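-- pv_equiv track=rewrite | github.com/thomasdevasia/advent-of-code-24 | day-9.py | remove_sapce
-- ===== SOURCE A (Python) =====
-- def remove_sapce(memory_map):
--     i = 0
--     j = len(memory_map) - 1
--     while i < j:
--         if memory_map[i] != '.':
--             i += 1
--         if memory_map[j] == '.':
--             j -= 1
--         if memory_map[i] == '.' and memory_map[j] != '.':
--             memory_map[i] = memory_map[j]
--             memory_map[j] = '.'
--             i += 1
--             j -= 1
--     return memory_map
-- ===== SOURCE B (Python) =====
-- def remove_sapce(memory_map):
--     n = sum(1 for x in memory_map if x != '.')
--     right = [x for x in memory_map[n:] if x != '.'][::-1]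
--     res = []
--     k = 0
--     for x in memory_map[:n]:
--         if x != '.':
--             res.append(x)
--         else:
--             res.append(right[k])
--             k += 1
--     res += ['.'] * (len(memory_map) - n)
--     memory_map[:] = res
--     return memory_map
-- ===== Notes on version B (the rewrite author's own statement) =====
-- stated objective: simpler
-- what changed: Replaces A's in-place two-pointer swapping loop by a direct construction: count the non-dot entries, fill the gaps in the prefix from the reversed list of right-hand values, then pad with dots.
-- intended difference: On lists where, at the compaction boundary (index n = number of non-dot entries), the run of non-dot entries ending at n-1 has the same length as the run of dots starting at n, A's two cursors cross and perform one extra swap, returning the compaction with that boundary value and dot transposed (e.g. ['a','.'] -> ['.','a']); B returns the true left-compaction (['a','.'] -> ['a','.']), the intended behaviour of moving non-dot characters left over dots. — e.g. on remove_sapce(["a", "."]): A returns [".", "a"], B returns ["a", "."]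
import Mathlib
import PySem

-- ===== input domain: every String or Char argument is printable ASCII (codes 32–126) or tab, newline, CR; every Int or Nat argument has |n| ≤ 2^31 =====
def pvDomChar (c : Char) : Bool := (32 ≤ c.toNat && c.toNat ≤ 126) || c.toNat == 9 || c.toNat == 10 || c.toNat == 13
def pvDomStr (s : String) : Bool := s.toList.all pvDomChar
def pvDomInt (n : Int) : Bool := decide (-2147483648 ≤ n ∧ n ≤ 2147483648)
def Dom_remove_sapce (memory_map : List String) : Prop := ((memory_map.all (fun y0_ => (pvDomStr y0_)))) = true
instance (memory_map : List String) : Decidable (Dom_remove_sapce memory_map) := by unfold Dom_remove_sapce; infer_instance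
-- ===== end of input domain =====

-- B compacts directly (count non-dot entries, fill the prefix gaps from the reversed right-hand
-- values, pad with dots) instead of A's in-place two-pointer swapping: simpler, and on the
-- D_-region below it returns the intended left-compaction where A's cursors cross and move a
-- value rightward.  A mutates its argument in place and B's Python does the same via slice
-- assignment; the theorems below are about the (equal) returned list value.

-- ===== PORT A =====

def loopA (mm : List String) (i j : Int) : List String :=
  if _h : i < j then
    let i1 : Int := if PySem.List.pyGetD mm i "" ≠ "." then i + 1 else i
    let j1 : Int := if PySem.List.pyGetD mm j "" = "." then j - 1 else j
    if _h3 : PySem.List.pyGetD mm i1 "" = "." ∧ PySem.List.pyGetD mm j1 "" ≠ "." then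
      loopA (PySem.List.pySetD (PySem.List.pySetD mm i1 (PySem.List.pyGetD mm j1 "")) j1 ".")
        (i1 + 1) (j1 - 1)
    else
      loopA mm i1 j1
  else mm
termination_by (j - i).toNat
decreasing_by
  · split <;> split <;> omega
  · by_cases ha : PySem.List.pyGetD mm i "" ≠ "."
    · rw [dif_pos ha]; split <;> omega
    · by_cases hb : PySem.List.pyGetD mm j "" = "."
      · rw [dif_pos hb, dif_neg ha]; omega
      · exfalso
        simp only [i1, j1, dif_neg ha, dif_neg hb] at _h3
        exact _h3 ⟨not_ne_iff.mp ha, hb⟩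

def remove_sapce (memory_map : List String) : List String :=
  loopA memory_map 0 ((memory_map.length : Int) - 1)

-- ===== PORT B =====

def remove_sapce_alt (memory_map : List String) : List String :=
  let n : Int := memory_map.foldl (fun acc x => if x ≠ "." then acc + 1 else acc) 0
  let right : List String :=
    ((PySem.List.slice memory_map (some n) none).filter (fun x => x ≠ ".")).reverse
  let fill := (PySem.List.slice memory_map none (some n)).foldl
    (fun (p : List String × Int) x =>
      if x ≠ "." then (p.1 ++ [x], p.2)
      else (p.1 ++ [PySem.List.pyGetD right p.2 ""], p.2 + 1)) ([], 0)
  fill.1 ++ PySem.List.pyRepeat ["."] ((memory_map.length : Int) - n)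

-- ===== SPEC =====

-- On lists where, at the compaction boundary (index n = number of non-dot entries), the run of
-- non-dot entries ending at n-1 has the same length as the run of dots starting at n, A performs
-- one extra crossed swap and returns the compaction with that boundary value and dot transposed
-- (e.g. ['a','.'] -> ['.','a']), moving a value to the right; B returns the true left-compaction
-- (['a','.'] -> ['a','.']), the intended behaviour of moving non-dot characters left over dots.
def D_remove_sapce (memory_map : List String) : Prop :=
  let n := memory_map.countP (fun x => decide (x ≠ "."))
  let r := ((memory_map.take n).rtakeWhile (fun x => decide (x ≠ "."))).length
  0 < r ∧ r = ((memory_map.drop n).takeWhile (fun x => decide (x = "."))).length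
instance (memory_map : List String) : Decidable (D_remove_sapce memory_map) := by
  unfold D_remove_sapce; infer_instance

def Spec_remove_sapce (memory_map : List String) (out : List String) : Prop :=
  ¬ D_remove_sapce memory_map → out = remove_sapce_alt memory_map
instance (memory_map : List String) (out : List String) : Decidable (Spec_remove_sapce memory_map out) := by
  unfold Spec_remove_sapce; infer_instance

def pvDiffWitness_remove_sapce : List String := ["a", "."]
def pvDiffWitnessOut_remove_sapce : (List String) × (List String) := ([".", "a"], ["a", "."])

-- ===== CLAIM (what is proved, stated in full; the proofs are below) =====
def Claim_unchanged_remove_sapce : Prop :=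
  ∀ (memory_map : List String), Dom_remove_sapce memory_map →
    Spec_remove_sapce memory_map (remove_sapce memory_map)
def Claim_changed_remove_sapce : Prop :=
  Dom_remove_sapce (pvDiffWitness_remove_sapce) ∧ D_remove_sapce (pvDiffWitness_remove_sapce) ∧
  remove_sapce (pvDiffWitness_remove_sapce) = pvDiffWitnessOut_remove_sapce.1 ∧
  remove_sapce_alt (pvDiffWitness_remove_sapce) = pvDiffWitnessOut_remove_sapce.2 ∧
  pvDiffWitnessOut_remove_sapce.1 ≠ pvDiffWitnessOut_remove_sapce.2
def Claim_exact_remove_sapce : Prop :=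
  ∀ (memory_map : List String), Dom_remove_sapce memory_map → D_remove_sapce memory_map →
    remove_sapce memory_map ≠ remove_sapce_alt memory_map

-- ===== LEMMAS AND PROOFS =====
-- Proof plan: the one-step stripping both programs perform is captured by the proof-side
-- recursion CS (A's resulting values) alongside Race (does A's final cross-swap fire).
-- loopA_window shows A's loop computes CS on its window; CS_eq_Bcore characterises CS as B's
-- count-and-fill construction (idealS) with a final swap exactly when Race; alt_eq_ideal unfolds
-- B's port to idealS.  Outside D_ (Race false) the two agree; inside D_ the swap always changes
-- the list (Claim_exact).

-- Race t = true iff A's compaction ends with the cursors on an adjacent (value, '.') pair: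
-- recursion stripping settled elements from the two ends of the list.
def Race : List String → Bool
  | [] => false
  | [_] => false
  | x :: z :: w =>
    let m := (z :: w).dropLast
    let y := (z :: w).getLastD "."
    if x ≠ "." then
      if y = "." then
        if m = [] then true
        else if 2 ≤ m.length ∧ m.getD 0 "" = "." ∧ m.getLastD "." ≠ "." then
          Race ((m.drop 1).dropLast)
        else Race m
      else
        if m ≠ [] ∧ m.getD 0 "" = "." then Race (m.drop 1)
        else Race (m ++ [y])
    else
      if y = "." then
        if m ≠ [] ∧ m.getLastD "." ≠ "." then Race m.dropLast
        else Race (x :: m)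
      else Race m
termination_by t => t.length
decreasing_by all_goals (simp_all [List.length_dropLast]; try omega)


def CS : List String → List String
  | [] => []
  | [x] => [x]
  | x :: z :: w =>
    let m := (z :: w).dropLast
    let y := (z :: w).getLastD "."
    if x ≠ "." then
      if y = "." then
        if m = [] then [".", x]
        else if 2 ≤ m.length ∧ m.getD 0 "" = "." ∧ m.getLastD "." ≠ "." then
          [x, m.getLastD "."] ++ CS ((m.drop 1).dropLast) ++ [".", "."]
        else [x] ++ CS m ++ ["."]
      else
        if m ≠ [] ∧ m.getD 0 "" = "." then [x, y] ++ CS (m.drop 1) ++ ["."]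
        else [x] ++ CS (m ++ [y])
    else
      if y = "." then
        if m ≠ [] ∧ m.getLastD "." ≠ "." then
          [m.getLastD "."] ++ CS m.dropLast ++ [".", "."]
        else CS (x :: m) ++ ["."]
      else [y] ++ CS m ++ ["."]
termination_by t => t.length
decreasing_by all_goals (simp_all [List.length_dropLast]; try omega)

theorem CS_cat (x y : String) (m : List String) :
    CS (x :: (m ++ [y])) =
      if x ≠ "." then
        if y = "." then
          if m = [] then [".", x]
          else if 2 ≤ m.length ∧ m.getD 0 "" = "." ∧ m.getLastD "." ≠ "." then
            [x, m.getLastD "."] ++ CS ((m.drop 1).dropLast) ++ [".", "."]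
          else [x] ++ CS m ++ ["."]
        else
          if m ≠ [] ∧ m.getD 0 "" = "." then [x, y] ++ CS (m.drop 1) ++ ["."]
          else [x] ++ CS (m ++ [y])
      else
        if y = "." then
          if m ≠ [] ∧ m.getLastD "." ≠ "." then
            [m.getLastD "."] ++ CS m.dropLast ++ [".", "."]
          else CS (x :: m) ++ ["."]
        else [y] ++ CS m ++ ["."] := by
  cases m with
  | nil => simp [CS]
  | cons z m' =>
    have h1 : (z :: (m' ++ [y])).dropLast = z :: m' := by
      rw [← List.cons_append, List.dropLast_concat]
    have h2 : (z :: (m' ++ [y])).getLastD "." = y := by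
      rw [← List.cons_append, List.getLastD_concat]
    rw [show (x :: ((z :: m') ++ [y]) : List String) = x :: z :: (m' ++ [y]) from rfl]
    conv_lhs => rw [CS.eq_3]
    rw [h1, h2]

theorem pyGetD_mid (P t S : List String) (idx : Int) (k : Nat) (hk : k < t.length)
    (hidx : idx = (P.length : Int) + k) :
    PySem.List.pyGetD (P ++ t ++ S) idx "" = t[k] := by
  have : idx = ((P.length + k : Nat) : Int) := by push_cast; omega
  rw [this, PySem.List.pyGetD_natCast]
  rw [List.append_assoc, List.getD_eq_getElem?_getD, List.getElem?_append_right (by omega)]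
  have h2 : P.length + k - P.length = k := by omega
  rw [h2, List.getElem?_append_left hk, List.getElem?_eq_getElem hk]
  rfl

theorem pySetD_mid (P t S : List String) (idx : Int) (k : Nat) (hk : k < t.length) (v : String)
    (hidx : idx = (P.length : Int) + k) :
    PySem.List.pySetD (P ++ t ++ S) idx v = P ++ t.set k v ++ S := by
  have : idx = ((P.length + k : Nat) : Int) := by push_cast; omega
  rw [this, PySem.List.pySetD_natCast]
  rw [List.append_assoc, List.set_append_right _ _ (by omega)]
  have h2 : P.length + k - P.length = k := by omega
  rw [h2, List.set_append_left _ _ hk]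
  simp

theorem Race_cat (x y : String) (m : List String) :
    Race (x :: (m ++ [y])) =
      if x ≠ "." then
        if y = "." then
          if m = [] then true
          else if 2 ≤ m.length ∧ m.getD 0 "" = "." ∧ m.getLastD "." ≠ "." then
            Race ((m.drop 1).dropLast)
          else Race m
        else
          if m ≠ [] ∧ m.getD 0 "" = "." then Race (m.drop 1)
          else Race (m ++ [y])
      else
        if y = "." then
          if m ≠ [] ∧ m.getLastD "." ≠ "." then Race m.dropLast
          else Race (x :: m)
        else Race m := by
  cases m with
  | nil => simp [Race]
  | cons z m' =>
    have h1 : (z :: (m' ++ [y])).dropLast = z :: m' := by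
      rw [← List.cons_append, List.dropLast_concat]
    have h2 : (z :: (m' ++ [y])).getLastD "." = y := by
      rw [← List.cons_append, List.getLastD_concat]
    rw [show (x :: ((z :: m') ++ [y]) : List String) = x :: z :: (m' ++ [y]) from rfl]
    conv_lhs => rw [Race.eq_3]
    rw [h1, h2]

theorem gE_last (x y : String) (m : List String) :
    (x :: (m ++ [y]))[m.length + 1]'(by simp) = y := by
  have h : (x :: (m ++ [y])) = (x :: m) ++ [y] := by simp
  rw [List.getElem_of_eq h]
  rw [List.getElem_append_right (by simp)]
  simp

theorem gE_pen (x y ml : String) (mid : List String) :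
    (x :: ((mid ++ [ml]) ++ [y]))[mid.length + 1]'(by simp) = ml := by
  have h : (x :: ((mid ++ [ml]) ++ [y])) = (x :: mid) ++ ([ml] ++ [y]) := by simp
  rw [List.getElem_of_eq h]
  rw [List.getElem_append_right (by simp)]
  simp

theorem set_last (x y v : String) (m : List String) :
    (x :: (m ++ [y])).set (m.length + 1) v = x :: (m ++ [v]) := by
  have h : (x :: (m ++ [y])) = (x :: m) ++ [y] := by simp
  rw [h, List.set_append_right _ _ (by simp)]
  simp

theorem set_pen (x y ml v : String) (mid : List String) :
    (x :: ((mid ++ [ml]) ++ [y])).set (mid.length + 1) v = x :: ((mid ++ [v]) ++ [y]) := by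
  have h : (x :: ((mid ++ [ml]) ++ [y])) = (x :: mid) ++ ([ml] ++ [y]) := by simp
  rw [h, List.set_append_right _ _ (by simp)]
  simp

theorem gLast_cc (z a d : String) (l : List String) : (z :: (l ++ [a])).getLast?.getD d = a := by
  rw [← List.cons_append, List.getLast?_concat]
  rfl

theorem dropLast_cc (z a : String) (l : List String) : (z :: (l ++ [a])).dropLast = z :: l := by
  rw [← List.cons_append, List.dropLast_concat]

theorem CS_nil : CS [] = [] := by simp [CS]
theorem CS_single (x : String) : CS [x] = [x] := by simp [CS]

theorem loopA_window (fuel : Nat) : ∀ (t P S : List String) (lo hi : Int),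
    t.length ≤ fuel → lo = (P.length : Int) → hi = (P.length : Int) + t.length - 1 →
    loopA (P ++ t ++ S) lo hi = P ++ CS t ++ S := by
  induction fuel with
  | zero =>
    intro t P S lo hi hlen hlo hhi
    have ht : t = [] := List.length_eq_zero_iff.mp (by omega)
    subst ht
    rw [loopA.eq_def, dif_neg (by simp at hhi; omega), CS_nil]
  | succ n ih =>
    intro t P S lo hi hlen hlo hhi
    rcases t with _ | ⟨x, rest⟩
    · rw [loopA.eq_def, dif_neg (by simp at hhi; omega), CS_nil]
    rcases List.eq_nil_or_concat rest with hrest | ⟨m, y, hmy⟩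
    · subst hrest
      rw [loopA.eq_def, dif_neg (by simp at hhi; omega), CS_single]
    rw [List.concat_eq_append] at hmy
    subst hmy
    have hLL : (x :: (m ++ [y])).length = m.length + 2 := by simp
    rw [hLL] at hlen hhi
    have gx : PySem.List.pyGetD (P ++ (x :: (m ++ [y])) ++ S) lo "" = x :=
      pyGetD_mid P _ S lo 0 (by simp) (by omega)
    have gy : PySem.List.pyGetD (P ++ (x :: (m ++ [y])) ++ S) hi "" = y := by
      have := pyGetD_mid P (x :: (m ++ [y])) S hi (m.length + 1) (by simp) (by push_cast; omega)
      rw [this, gE_last]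
    rw [loopA.eq_def, dif_pos (by omega)]
    simp only [gx, gy]
    by_cases hx : x = "." <;> by_cases hy : y = "."
    · -- x = ".", y = "."
      rw [if_neg (show ¬(x ≠ ".") from by simp [hx]), if_pos hy]
      rcases List.eq_nil_or_concat m with hm | ⟨mid, ml, hm⟩
      · subst hm
        have g1 : PySem.List.pyGetD (P ++ x :: (([] : List String) ++ [y]) ++ S) (hi - 1) "" = x :=
          pyGetD_mid P _ S _ 0 (by simp) (by simp at hhi; omega)
        rw [dif_neg (by rw [g1, hx]; simp)]
        rw [loopA.eq_def, dif_neg (by simp at hhi; omega)]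
        rw [CS_cat]
        simp [hx, hy, CS]
      · rw [List.concat_eq_append] at hm
        subst hm
        have gml : PySem.List.pyGetD (P ++ x :: ((mid ++ [ml]) ++ [y]) ++ S) (hi - 1) "" = ml := by
          rw [pyGetD_mid P _ S _ (mid.length + 1) (by simp) (by simp at hhi ⊢; push_cast; omega)]
          exact gE_pen x y ml mid
        by_cases hml : ml = "."
        · -- no move
          rw [dif_neg (by rw [gml, hml]; simp)]
          have hassoc : P ++ x :: ((mid ++ [ml]) ++ [y]) ++ S
              = P ++ (x :: (mid ++ [ml])) ++ ([y] ++ S) := by simp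
          rw [hassoc]
          rw [ih (x :: (mid ++ [ml])) P ([y] ++ S) lo (hi - 1) (by simp at hlen ⊢; omega) hlo
            (by simp at hhi ⊢; push_cast; omega)]
          conv_rhs => rw [CS_cat x y (mid ++ [ml])]
          simp [hx, hy, hml, gLast_cc, dropLast_cc]
        · -- move
          rw [dif_pos ⟨by rw [gx, hx], by rw [gml]; exact hml⟩]
          rw [gml]
          rw [pySetD_mid P _ S lo 0 (by simp) ml (by omega)]
          rw [pySetD_mid P ((x :: ((mid ++ [ml]) ++ [y])).set 0 ml) S (hi - 1) (mid.length + 1)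
            (by simp) "." (by simp at hhi ⊢; push_cast; omega)]
          rw [show (x :: ((mid ++ [ml]) ++ [y])).set 0 ml = ml :: ((mid ++ [ml]) ++ [y]) from rfl]
          rw [set_pen ml y ml "." mid]
          have hassoc : P ++ ml :: ((mid ++ ["."]) ++ [y]) ++ S
              = (P ++ [ml]) ++ mid ++ (["."] ++ [y] ++ S) := by simp
          rw [hassoc]
          rw [ih mid (P ++ [ml]) (["."] ++ [y] ++ S) (lo + 1) (hi - 1 - 1)
            (by simp at hlen ⊢; omega) (by simp; omega) (by simp at hhi ⊢; push_cast; omega)]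
          conv_rhs => rw [CS_cat x y (mid ++ [ml])]
          simp [hx, hy, hml, gLast_cc, dropLast_cc]
    · -- x = ".", y ≠ "."
      rw [if_neg (show ¬(x ≠ ".") from by simp [hx]), if_neg hy]
      rw [dif_pos ⟨by rw [gx, hx], by rw [gy]; exact hy⟩]
      rw [gy]
      rw [pySetD_mid P _ S lo 0 (by simp) y (by omega)]
      rw [show (x :: (m ++ [y])).set 0 y = y :: (m ++ [y]) from rfl]
      rw [pySetD_mid P (y :: (m ++ [y])) S hi (m.length + 1) (by simp) "." (by push_cast; omega)]
      rw [set_last y y "." m]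
      have hassoc : P ++ y :: (m ++ ["."]) ++ S = (P ++ [y]) ++ m ++ (["."] ++ S) := by simp
      rw [hassoc]
      rw [ih m (P ++ [y]) (["."] ++ S) (lo + 1) (hi - 1)
        (by omega) (by simp; omega) (by simp; push_cast; omega)]
      conv_rhs => rw [CS_cat x y m]
      simp [hx, hy]
    · -- x ≠ ".", y = "."
      rw [if_pos hx, if_pos hy]
      rcases List.eq_nil_or_concat m with hm | ⟨mid, ml, hm⟩
      · subst hm
        have g1 : PySem.List.pyGetD (P ++ x :: (([] : List String) ++ [y]) ++ S) (lo + 1) "" = y :=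
          pyGetD_mid P _ S _ 1 (by simp) (by omega)
        have g0 : PySem.List.pyGetD (P ++ x :: (([] : List String) ++ [y]) ++ S) (hi - 1) "" = x :=
          pyGetD_mid P _ S _ 0 (by simp) (by simp at hhi; omega)
        rw [dif_pos ⟨by rw [g1, hy], by rw [g0]; exact hx⟩]
        rw [g0]
        rw [pySetD_mid P _ S (lo + 1) 1 (by simp) x (by omega)]
        rw [show (x :: (([] : List String) ++ [y])).set 1 x = x :: (([] : List String) ++ [x]) from rfl]
        rw [pySetD_mid P _ S (hi - 1) 0 (by simp) "." (by simp at hhi; omega)]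
        rw [show (x :: (([] : List String) ++ [x])).set 0 "." = "." :: (([] : List String) ++ [x]) from rfl]
        rw [loopA.eq_def, dif_neg (by simp at hhi; omega)]
        conv_rhs => rw [CS_cat x y []]
        simp [hx, hy]
      · rw [List.concat_eq_append] at hm
        subst hm
        have gpen : PySem.List.pyGetD (P ++ x :: ((mid ++ [ml]) ++ [y]) ++ S) (hi - 1) "" = ml := by
          rw [pyGetD_mid P _ S _ (mid.length + 1) (by simp) (by simp at hhi ⊢; push_cast; omega)]
          exact gE_pen x y ml mid
        rcases mid with _ | ⟨md0, mid'⟩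
        · -- mid = [] : m = [ml]
          have g1 : PySem.List.pyGetD (P ++ x :: ((([] : List String) ++ [ml]) ++ [y]) ++ S) (lo + 1) "" = ml :=
            pyGetD_mid P _ S _ 1 (by simp) (by omega)
          rw [dif_neg (by rw [g1, gpen]; intro h; exact h.2 h.1)]
          have hassoc : P ++ x :: ((([] : List String) ++ [ml]) ++ [y]) ++ S
              = (P ++ [x]) ++ (([] : List String) ++ [ml]) ++ ([y] ++ S) := by simp
          rw [hassoc]
          rw [ih (([] : List String) ++ [ml]) (P ++ [x]) ([y] ++ S) (lo + 1) (hi - 1)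
            (by simp at hlen ⊢; omega) (by simp; omega) (by simp at hhi ⊢; omega)]
          conv_rhs => rw [CS_cat x y ([] ++ [ml])]
          simp [hx, hy]
        · -- mid = md0 :: mid'
          have g1 : PySem.List.pyGetD (P ++ x :: (((md0 :: mid') ++ [ml]) ++ [y]) ++ S) (lo + 1) "" = md0 :=
            pyGetD_mid P _ S _ 1 (by simp) (by omega)
          by_cases hcond : md0 = "." ∧ ml ≠ "."
          · rw [dif_pos ⟨by rw [g1]; exact hcond.1, by rw [gpen]; exact hcond.2⟩]
            rw [gpen]
            rw [pySetD_mid P _ S (lo + 1) 1 (by simp) ml (by omega)]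
            rw [show (x :: (((md0 :: mid') ++ [ml]) ++ [y])).set 1 ml
              = x :: (((ml :: mid') ++ [ml]) ++ [y]) from rfl]
            rw [pySetD_mid P (x :: (((ml :: mid') ++ [ml]) ++ [y])) S (hi - 1)
              ((ml :: mid').length + 1) (by simp) "." (by simp at hhi ⊢; push_cast; omega)]
            rw [set_pen x y ml "." (ml :: mid')]
            have hassoc : P ++ x :: (((ml :: mid') ++ ["."]) ++ [y]) ++ S
                = (P ++ [x, ml]) ++ mid' ++ (["."] ++ [y] ++ S) := by simp
            rw [hassoc]
            rw [ih mid' (P ++ [x, ml]) (["."] ++ [y] ++ S) (lo + 1 + 1) (hi - 1 - 1)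
              (by simp at hlen ⊢; omega) (by simp; omega) (by simp at hhi ⊢; push_cast; omega)]
            conv_rhs => rw [CS_cat x y ((md0 :: mid') ++ [ml])]
            simp [hx, hy, hcond.1, hcond.2, gLast_cc, dropLast_cc]
          · rw [dif_neg (by rw [g1, gpen]; exact hcond)]
            have hassoc : P ++ x :: (((md0 :: mid') ++ [ml]) ++ [y]) ++ S
                = (P ++ [x]) ++ ((md0 :: mid') ++ [ml]) ++ ([y] ++ S) := by simp
            rw [hassoc]
            rw [ih ((md0 :: mid') ++ [ml]) (P ++ [x]) ([y] ++ S) (lo + 1) (hi - 1)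
              (by simp at hlen ⊢; omega) (by simp; omega) (by simp at hhi ⊢; push_cast; omega)]
            conv_rhs => rw [CS_cat x y ((md0 :: mid') ++ [ml])]
            simp [hx, hy, gLast_cc, dropLast_cc]
            rw [if_neg hcond]
            simp
    · -- x ≠ ".", y ≠ "."
      rw [if_pos hx, if_neg hy]
      rcases m with _ | ⟨z, m'⟩
      · have g1 : PySem.List.pyGetD (P ++ x :: (([] : List String) ++ [y]) ++ S) (lo + 1) "" = y :=
          pyGetD_mid P _ S _ 1 (by simp) (by omega)
        rw [dif_neg (by rw [g1]; intro h; exact hy h.1)]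
        have hassoc : P ++ x :: (([] : List String) ++ [y]) ++ S
            = (P ++ [x]) ++ (([] : List String) ++ [y]) ++ S := by simp
        rw [hassoc]
        rw [ih ([] ++ [y]) (P ++ [x]) S (lo + 1) hi
          (by simp at hlen ⊢; omega) (by simp; omega) (by simp at hhi ⊢; omega)]
        conv_rhs => rw [CS_cat x y []]
        simp [hx, hy]
      · have g1 : PySem.List.pyGetD (P ++ x :: ((z :: m') ++ [y]) ++ S) (lo + 1) "" = z :=
          pyGetD_mid P _ S _ 1 (by simp) (by omega)
        by_cases hz : z = "."
        · rw [dif_pos ⟨by rw [g1]; exact hz, by rw [gy]; exact hy⟩]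
          rw [gy]
          rw [pySetD_mid P _ S (lo + 1) 1 (by simp) y (by omega)]
          rw [show (x :: ((z :: m') ++ [y])).set 1 y = x :: ((y :: m') ++ [y]) from rfl]
          rw [pySetD_mid P (x :: ((y :: m') ++ [y])) S hi ((y :: m').length + 1) (by simp) "."
            (by simp at hhi ⊢; push_cast; omega)]
          rw [set_last x y "." (y :: m')]
          have hassoc : P ++ x :: ((y :: m') ++ ["."]) ++ S
              = (P ++ [x, y]) ++ m' ++ (["."] ++ S) := by simp
          rw [hassoc]
          rw [ih m' (P ++ [x, y]) (["."] ++ S) (lo + 1 + 1) (hi - 1)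
            (by simp at hlen ⊢; omega) (by simp; omega) (by simp at hhi ⊢; push_cast; omega)]
          conv_rhs => rw [CS_cat x y (z :: m')]
          simp [hx, hy, hz]
        · rw [dif_neg (by rw [g1]; intro h; exact hz h.1)]
          have hassoc : P ++ x :: ((z :: m') ++ [y]) ++ S
              = (P ++ [x]) ++ ((z :: m') ++ [y]) ++ S := by simp
          rw [hassoc]
          rw [ih ((z :: m') ++ [y]) (P ++ [x]) S (lo + 1) hi
            (by simp at hlen ⊢; omega) (by simp; omega) (by simp at hhi ⊢; push_cast; omega)]
          conv_rhs => rw [CS_cat x y (z :: m')]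
          simp [hx, hy, hz]

theorem Race_single (x : String) : Race [x] = false := by simp [Race]

def ndS (t : List String) : Nat := t.countP (fun x => decide (x ≠ "."))

def fillGo : List String → List String → List String
  | [], _ => []
  | x :: xs, rs =>
    if x ≠ "." then x :: fillGo xs rs else rs.getD 0 "" :: fillGo xs (rs.drop 1)

def idealS (t : List String) : List String :=
  fillGo (t.take (ndS t)) (((t.drop (ndS t)).filter (fun x => decide (x ≠ "."))).reverse)
    ++ List.replicate (t.length - ndS t) "."

def swapNN (l : List String) (k : Nat) : List String :=
  (l.set (k - 1) (l.getD k "")).set k (l.getD (k - 1) "")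

def Bcore (t : List String) : List String :=
  if Race t then swapNN (idealS t) (ndS t) else idealS t

theorem ndS_le (t : List String) : ndS t ≤ t.length := List.countP_le_length

theorem length_fillGo (xs : List String) : ∀ rs, (fillGo xs rs).length = xs.length := by
  induction xs with
  | nil => intro rs; simp [fillGo]
  | cons x xs ih => intro rs; by_cases hx : x = "." <;> simp [fillGo, hx, ih]

theorem length_idealS (t : List String) : (idealS t).length = t.length := by
  have h := ndS_le t
  simp [idealS, length_fillGo, min_eq_left h]
  omega

theorem idealS_nil : idealS [] = [] := rfl

theorem idealS_single (x : String) : idealS [x] = [x] := by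
  by_cases hx : x = "."
  · subst hx; simp [idealS, ndS, fillGo]
  · simp [idealS, ndS, hx, fillGo, List.countP_cons]

theorem idealS_cons (x : String) (s : List String) (hx : x ≠ ".") :
    idealS (x :: s) = x :: idealS s := by
  have hn : ndS (x :: s) = ndS s + 1 := by simp [ndS, List.countP_cons, hx]
  have hle := ndS_le s
  unfold idealS
  rw [hn]
  simp only [List.take_succ_cons, List.drop_succ_cons, List.length_cons]
  rw [show (s.length + 1) - (ndS s + 1) = s.length - ndS s from by omega]
  simp [fillGo, hx]

theorem idealS_concat_dot (s : List String) : idealS (s ++ ["."]) = idealS s ++ ["."] := by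
  have hn : ndS (s ++ ["."]) = ndS s := by simp [ndS, List.countP_append]
  have hle := ndS_le s
  unfold idealS
  rw [hn]
  rw [List.take_append_of_le_length hle, List.drop_append_of_le_length hle]
  rw [show (s ++ ["."]).length - ndS s = (s.length - ndS s) + 1 from by simp; omega]
  rw [List.replicate_succ']
  simp [List.filter_append]

theorem idealS_dot_concat (y : String) (s : List String) (hy : y ≠ ".") :
    idealS ("." :: (s ++ [y])) = y :: (idealS s ++ ["."]) := by
  have hn : ndS ("." :: (s ++ [y])) = ndS s + 1 := by
    simp [ndS, List.countP_cons, List.countP_append, hy]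
  have hle := ndS_le s
  unfold idealS
  rw [hn]
  simp only [List.take_succ_cons, List.drop_succ_cons, List.length_cons]
  rw [List.take_append_of_le_length hle, List.drop_append_of_le_length hle]
  rw [show (s ++ [y]).length + 1 - (ndS s + 1) = (s.length - ndS s) + 1 from by simp; omega]
  rw [List.replicate_succ']
  have hfilt : ((s.drop (ndS s)).filter (fun x => decide (x ≠ ".")) ++ [y]).reverse
      = y :: ((s.drop (ndS s)).filter (fun x => decide (x ≠ "."))).reverse := by simp
  simp [fillGo, hy, hfilt]

theorem swap_cons (a : String) (l : List String) (k : Nat) (hk : 1 ≤ k) :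
    swapNN (a :: l) (k + 1) = a :: swapNN l k := by
  obtain ⟨j, rfl⟩ : ∃ j, k = j + 1 := ⟨k - 1, by omega⟩
  simp [swapNN]

theorem swap_append (l l' : List String) (k : Nat) (hk1 : 1 ≤ k) (hk2 : k < l.length) :
    swapNN (l ++ l') k = swapNN l k ++ l' := by
  unfold swapNN
  rw [List.getD_append _ _ _ _ hk2, List.getD_append _ _ _ _ (by omega)]
  rw [List.set_append_left _ _ (by omega), List.set_append_left _ _ (by simp; omega)]

theorem Race_pos (fuel : Nat) : ∀ t : List String, t.length ≤ fuel → Race t = true →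
    1 ≤ ndS t ∧ ndS t < t.length := by
  induction fuel with
  | zero =>
    intro t hlen hFS
    have ht : t = [] := List.length_eq_zero_iff.mp (by omega)
    subst ht; simp [Race] at hFS
  | succ n ih =>
    intro t hlen hFS
    rcases t with _ | ⟨x, rest⟩
    · simp [Race] at hFS
    rcases List.eq_nil_or_concat rest with hrest | ⟨m, y, hmy⟩
    · subst hrest; simp [Race] at hFS
    rw [List.concat_eq_append] at hmy
    subst hmy
    simp at hlen
    rw [Race_cat] at hFS
    by_cases hx : x = "." <;> by_cases hy : y = "."
    · -- x = ".", y = "."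
      rw [if_neg (by simp [hx]), if_pos hy] at hFS
      rcases List.eq_nil_or_concat m with hm | ⟨mid, ml, hm⟩
      · subst hm
        rw [if_neg (by simp)] at hFS
        simp [hx, Race] at hFS
      · rw [List.concat_eq_append] at hm
        subst hm
        by_cases hml : ml = "."
        · rw [if_neg (by simp [gLast_cc, hml])] at hFS
          rw [hx] at hFS
          have := ih ("." :: (mid ++ [ml]))
            (by have h9 : ("." :: (mid ++ [ml])).length = mid.length + 2 := by simp
                have h8 : (mid ++ [ml]).length = mid.length + 1 := by simp
                omega) hFS
          simp [ndS, List.countP_cons, List.countP_append, hx, hy, hml] at this ⊢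
          obtain ⟨t1, t2⟩ := this
          exact ⟨t1, by omega⟩
        · rw [if_pos (by simp [hml])] at hFS
          simp [ndS, List.countP_cons, List.countP_append, hx, hy, hml]
          have := ndS_le mid
          simp [ndS] at this
          have h8 : (mid ++ [ml]).length = mid.length + 1 := by simp
          omega
    · -- x = ".", y ≠ "."
      have h1 := ndS_le m
      simp [ndS, List.countP_cons, List.countP_append, hx, hy] at h1 ⊢
      omega
    · -- x ≠ ".", y = "."
      have h1 := ndS_le m
      simp [ndS, List.countP_cons, List.countP_append, hx, hy] at h1 ⊢
      omega
    · -- x ≠ ".", y ≠ "."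
      rw [if_pos hx, if_neg hy] at hFS
      rcases m with _ | ⟨z, m'⟩
      · rw [if_neg (by simp)] at hFS
        simp [Race] at hFS
      · by_cases hz : z = "."
        · have h1 := ndS_le m'
          simp [ndS, List.countP_cons, List.countP_append, hx, hy, hz] at h1 ⊢
          omega
        · rw [if_neg (by simp [hz])] at hFS
          have := ih ((z :: m') ++ [y])
            (by have h9 : ((z :: m') ++ [y]).length = m'.length + 2 := by simp
                have h8 : (z :: m').length = m'.length + 1 := by simp
                omega) hFS
          simp [ndS, List.countP_cons, List.countP_append, hx, hy, hz] at this ⊢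
          omega

theorem CS_eq_Bcore (fuel : Nat) : ∀ t : List String, t.length ≤ fuel → CS t = Bcore t := by
  induction fuel with
  | zero =>
    intro t hlen
    have ht : t = [] := List.length_eq_zero_iff.mp (by omega)
    subst ht
    simp [CS, Bcore, Race, idealS_nil]
  | succ n ih =>
    intro t hlen
    rcases t with _ | ⟨x, rest⟩
    · simp [CS, Bcore, Race, idealS_nil]
    rcases List.eq_nil_or_concat rest with hrest | ⟨m, y, hmy⟩
    · subst hrest
      simp [CS, Bcore, Race, idealS_single]
    rw [List.concat_eq_append] at hmy
    subst hmy
    have hlen2 : m.length + 2 ≤ n + 1 := by simp at hlen; omega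
    unfold Bcore
    by_cases hx : x = "." <;> by_cases hy : y = "."
    · -- x = ".", y = "."
      rcases List.eq_nil_or_concat m with hm | ⟨mid, ml, hm⟩
      · subst hm
        subst hx hy
        have hCS : CS ("." :: ([] ++ ["."])) = CS ["."] ++ ["."] := by
          rw [CS_cat]; simp
        have hFS : Race ("." :: ([] ++ ["."])) = Race ["."] := by
          rw [Race_cat]; simp
        have hID : idealS ("." :: ([] ++ ["."])) = idealS ["."] ++ ["."] := by
          rw [show ("." :: ([] ++ ["."]) : List String) = ["."] ++ ["."] from rfl, idealS_concat_dot]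
        rw [hCS, hFS, hID, Race_single, idealS_single]
        simp [CS]
      · rw [List.concat_eq_append] at hm
        subst hm
        subst hx hy
        by_cases hml : ml = "."
        · have hCS : CS ("." :: ((mid ++ [ml]) ++ ["."])) = CS ("." :: (mid ++ [ml])) ++ ["."] := by
            rw [CS_cat]; simp [gLast_cc, hml]
          have hFS : Race ("." :: ((mid ++ [ml]) ++ ["."])) = Race ("." :: (mid ++ [ml])) := by
            rw [Race_cat]; simp [gLast_cc, hml]
          have hID : idealS ("." :: ((mid ++ [ml]) ++ ["."])) = idealS ("." :: (mid ++ [ml])) ++ ["."] := by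
            rw [show ("." :: ((mid ++ [ml]) ++ ["."]) : List String)
              = ("." :: (mid ++ [ml])) ++ ["."] from rfl, idealS_concat_dot]
          have hND : ndS ("." :: ((mid ++ [ml]) ++ ["."])) = ndS ("." :: (mid ++ [ml])) := by
            simp [ndS, List.countP_cons, List.countP_append]
          rw [hCS, hFS, hID, hND]
          rw [ih ("." :: (mid ++ [ml])) (by simp at hlen2 ⊢; omega)]
          unfold Bcore
          by_cases hf : Race ("." :: (mid ++ [ml])) = true
          · rw [if_pos hf, if_pos hf]
            have hb := Race_pos ("." :: (mid ++ [ml])).length _ le_rfl hf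
            rw [swap_append _ _ _ hb.1 (by rw [length_idealS]; exact hb.2)]
          · rw [if_neg hf, if_neg hf]
        · have hCS : CS ("." :: ((mid ++ [ml]) ++ ["."])) = ml :: (CS mid ++ [".", "."]) := by
            rw [CS_cat]; simp [gLast_cc, dropLast_cc, hml]
          have hFS : Race ("." :: ((mid ++ [ml]) ++ ["."])) = Race mid := by
            rw [Race_cat]; simp [gLast_cc, dropLast_cc, hml]
          have hID : idealS ("." :: ((mid ++ [ml]) ++ ["."])) = ml :: (idealS mid ++ [".", "."]) := by
            rw [show ("." :: ((mid ++ [ml]) ++ ["."]) : List String)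
              = ("." :: (mid ++ [ml])) ++ ["."] from rfl, idealS_concat_dot]
            rw [idealS_dot_concat ml mid hml]
            simp
          have hND : ndS ("." :: ((mid ++ [ml]) ++ ["."])) = ndS mid + 1 := by
            simp [ndS, List.countP_cons, List.countP_append, hml]
          rw [hCS, hFS, hID, hND]
          rw [ih mid (by simp at hlen2 ⊢; omega)]
          unfold Bcore
          by_cases hf : Race mid = true
          · rw [if_pos hf, if_pos hf]
            have hb := Race_pos mid.length mid le_rfl hf
            rw [swap_cons ml _ _ hb.1]
            rw [swap_append _ _ _ hb.1 (by rw [length_idealS]; exact hb.2)]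
          · rw [if_neg hf, if_neg hf]
    · -- x = ".", y ≠ "."
      subst hx
      have hCS : CS ("." :: (m ++ [y])) = y :: (CS m ++ ["."]) := by
        rw [CS_cat]; simp [gLast_cc, hy]
      have hFS : Race ("." :: (m ++ [y])) = Race m := by
        rw [Race_cat]; simp [gLast_cc, hy]
      have hID : idealS ("." :: (m ++ [y])) = y :: (idealS m ++ ["."]) :=
        idealS_dot_concat y m hy
      have hND : ndS ("." :: (m ++ [y])) = ndS m + 1 := by
        simp [ndS, List.countP_cons, List.countP_append, hy]
      rw [hCS, hFS, hID, hND]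
      rw [ih m (by omega)]
      unfold Bcore
      by_cases hf : Race m = true
      · rw [if_pos hf, if_pos hf]
        have hb := Race_pos m.length m le_rfl hf
        rw [swap_cons y _ _ hb.1]
        rw [swap_append _ _ _ hb.1 (by rw [length_idealS]; exact hb.2)]
      · rw [if_neg hf, if_neg hf]
    · -- x ≠ ".", y = "."
      subst hy
      rcases List.eq_nil_or_concat m with hm | ⟨mid, ml, hm⟩
      · subst hm
        have hCS : CS (x :: ([] ++ ["."])) = [".", x] := by
          rw [CS_cat]; simp [hx]
        have hFS : Race (x :: ([] ++ ["."])) = true := by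
          rw [Race_cat]; simp [hx]
        have hID : idealS (x :: ([] ++ ["."])) = [x, "."] := by
          rw [show (x :: ([] ++ ["."]) : List String) = x :: ["."] from rfl,
            idealS_cons x ["."] hx, idealS_single]
        have hND : ndS (x :: ([] ++ ["."])) = 1 := by
          simp [ndS, List.countP_cons, hx]
        rw [hCS, hFS, hID, hND, if_pos rfl]
        simp [swapNN]
      · rw [List.concat_eq_append] at hm
        subst hm
        have hID0 : idealS (x :: ((mid ++ [ml]) ++ ["."])) = x :: (idealS (mid ++ [ml]) ++ ["."]) := by
          rw [show (x :: ((mid ++ [ml]) ++ ["."]) : List String)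
            = x :: ((mid ++ [ml]) ++ ["."]) from rfl]
          rw [idealS_cons x ((mid ++ [ml]) ++ ["."]) hx, idealS_concat_dot]
        rcases mid with _ | ⟨md0, mid'⟩
        · have hCS : CS (x :: (([] ++ [ml]) ++ ["."])) = x :: (CS [ml] ++ ["."]) := by
            rw [CS_cat]; simp [hx]
          have hFS : Race (x :: (([] ++ [ml]) ++ ["."])) = Race [ml] := by
            rw [Race_cat]; simp [hx]
          rw [hCS, hFS, hID0, Race_single]
          rw [show (([] : List String) ++ [ml]) = [ml] from rfl, idealS_single]
          simp [CS]
        · by_cases hcond : md0 = "." ∧ ml ≠ "."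
          · have hCS : CS (x :: (((md0 :: mid') ++ [ml]) ++ ["."]))
                = x :: ml :: (CS mid' ++ [".", "."]) := by
              rw [CS_cat]
              simp [hx, gLast_cc, dropLast_cc, hcond.1, hcond.2]
            have hFS : Race (x :: (((md0 :: mid') ++ [ml]) ++ ["."])) = Race mid' := by
              rw [Race_cat]
              simp [hx, gLast_cc, dropLast_cc, hcond.1, hcond.2]
            have hID : idealS (x :: (((md0 :: mid') ++ [ml]) ++ ["."]))
                = x :: ml :: (idealS mid' ++ [".", "."]) := by
              rw [hID0]
              rw [show ((md0 :: mid') ++ [ml] : List String) = "." :: (mid' ++ [ml]) from by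
                rw [hcond.1]; rfl]
              rw [idealS_dot_concat ml mid' hcond.2]
              simp
            have hND : ndS (x :: (((md0 :: mid') ++ [ml]) ++ ["."])) = ndS mid' + 2 := by
              simp [ndS, List.countP_cons, List.countP_append, hx, hcond.1, hcond.2]
              try omega
            rw [hCS, hFS, hID, hND]
            rw [ih mid' (by simp at hlen2 ⊢; omega)]
            unfold Bcore
            by_cases hf : Race mid' = true
            · rw [if_pos hf, if_pos hf]
              have hb := Race_pos mid'.length mid' le_rfl hf
              rw [show ndS mid' + 2 = (ndS mid' + 1) + 1 from rfl]
              rw [swap_cons x _ _ (by omega)]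
              rw [swap_cons ml _ _ hb.1]
              rw [swap_append _ _ _ hb.1 (by rw [length_idealS]; exact hb.2)]
            · rw [if_neg hf, if_neg hf]
          · have hCS : CS (x :: (((md0 :: mid') ++ [ml]) ++ ["."]))
                = x :: (CS ((md0 :: mid') ++ [ml]) ++ ["."]) := by
              rw [CS_cat]
              simp [hx, gLast_cc]
              intro h1 h2
              exact absurd ⟨h1, h2⟩ hcond
            have hFS : Race (x :: (((md0 :: mid') ++ [ml]) ++ ["."])) = Race ((md0 :: mid') ++ [ml]) := by
              rw [Race_cat]
              simp [hx, gLast_cc]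
              intro h1 h2
              exact absurd ⟨h1, h2⟩ hcond
            have hND : ndS (x :: (((md0 :: mid') ++ [ml]) ++ ["."]))
                = ndS ((md0 :: mid') ++ [ml]) + 1 := by
              simp [ndS, List.countP_cons, List.countP_append, hx]
              try omega
            rw [hCS, hFS, hID0, hND]
            rw [ih ((md0 :: mid') ++ [ml]) (by simp at hlen2 ⊢; omega)]
            unfold Bcore
            by_cases hf : Race ((md0 :: mid') ++ [ml]) = true
            · rw [if_pos hf, if_pos hf]
              have hb := Race_pos ((md0 :: mid') ++ [ml]).length _ le_rfl hf
              rw [swap_cons x _ _ hb.1]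
              rw [swap_append _ _ _ hb.1 (by rw [length_idealS]; exact hb.2)]
            · rw [if_neg hf, if_neg hf]
    · -- x ≠ ".", y ≠ "."
      rcases m with _ | ⟨z, m'⟩
      · have hCS : CS (x :: ([] ++ [y])) = x :: CS [y] := by
          rw [CS_cat]; simp [hx, hy]
        have hFS : Race (x :: ([] ++ [y])) = Race [y] := by
          rw [Race_cat]; simp [hx, hy]
        have hID : idealS (x :: ([] ++ [y])) = x :: idealS [y] := by
          rw [show (x :: ([] ++ [y]) : List String) = x :: [y] from rfl, idealS_cons x [y] hx]
        rw [hCS, hFS, hID, Race_single, idealS_single]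
        simp [CS]
      · by_cases hz : z = "."
        · subst hz
          have hCS : CS (x :: (("." :: m') ++ [y])) = x :: y :: (CS m' ++ ["."]) := by
            rw [CS_cat]; simp [hx, hy]
          have hFS : Race (x :: (("." :: m') ++ [y])) = Race m' := by
            rw [Race_cat]; simp [hx, hy]
          have hID : idealS (x :: (("." :: m') ++ [y])) = x :: y :: (idealS m' ++ ["."]) := by
            rw [show (("." :: m') ++ [y] : List String) = "." :: (m' ++ [y]) from rfl]
            rw [idealS_cons x ("." :: (m' ++ [y])) hx, idealS_dot_concat y m' hy]
          have hND : ndS (x :: (("." :: m') ++ [y])) = ndS m' + 2 := by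
            simp [ndS, List.countP_cons, List.countP_append, hx, hy]
            try omega
          rw [hCS, hFS, hID, hND]
          rw [ih m' (by simp at hlen2 ⊢; omega)]
          unfold Bcore
          by_cases hf : Race m' = true
          · rw [if_pos hf, if_pos hf]
            have hb := Race_pos m'.length m' le_rfl hf
            rw [show ndS m' + 2 = (ndS m' + 1) + 1 from rfl]
            rw [swap_cons x _ _ (by omega)]
            rw [swap_cons y _ _ hb.1]
            rw [swap_append _ _ _ hb.1 (by rw [length_idealS]; exact hb.2)]
          · rw [if_neg hf, if_neg hf]
        · have hCS : CS (x :: ((z :: m') ++ [y])) = x :: CS ((z :: m') ++ [y]) := by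
            rw [CS_cat]; simp [hx, hy, hz]
          have hFS : Race (x :: ((z :: m') ++ [y])) = Race ((z :: m') ++ [y]) := by
            rw [Race_cat]; simp [hx, hy, hz]
          have hID : idealS (x :: ((z :: m') ++ [y])) = x :: idealS ((z :: m') ++ [y]) :=
            idealS_cons x ((z :: m') ++ [y]) hx
          have hND : ndS (x :: ((z :: m') ++ [y])) = ndS ((z :: m') ++ [y]) + 1 := by
            simp [ndS, List.countP_cons, List.countP_append, hx]
            try omega
          rw [hCS, hFS, hID, hND]
          rw [ih ((z :: m') ++ [y]) (by simp at hlen2 ⊢; omega)]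
          unfold Bcore
          by_cases hf : Race ((z :: m') ++ [y]) = true
          · rw [if_pos hf, if_pos hf]
            have hb := Race_pos ((z :: m') ++ [y]).length _ le_rfl hf
            rw [swap_cons x _ _ hb.1]
          · rw [if_neg hf, if_neg hf]

theorem fill_fold (rs : List String) : ∀ (xs acc : List String) (k : Nat),
    xs.foldl
      (fun (p : List String × Int) x =>
        if x ≠ "." then (p.1 ++ [x], p.2)
        else (p.1 ++ [PySem.List.pyGetD rs p.2 ""], p.2 + 1)) (acc, (k : Int))
      = (acc ++ fillGo xs (rs.drop k), ((k + xs.countP (fun x => decide (x = ".")) : Nat) : Int)) := by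
  intro xs
  induction xs with
  | nil => intro acc k; simp [fillGo]
  | cons x xs ihx =>
    intro acc k
    by_cases hxv : x = "."
    · subst hxv
      rw [List.foldl_cons]
      rw [show (if ("." : String) ≠ "." then (acc ++ ["."], (k : Int))
          else (acc ++ [PySem.List.pyGetD rs (k : Int) ""], (k : Int) + 1))
        = (acc ++ [PySem.List.pyGetD rs (k : Int) ""], ((k + 1 : Nat) : Int)) from by
          simp]
      rw [ihx (acc ++ [PySem.List.pyGetD rs (k : Int) ""]) (k + 1)]
      have hget : PySem.List.pyGetD rs (k : Int) "" = (rs.drop k).getD 0 "" := by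
        rw [PySem.List.pyGetD_natCast]
        simp [List.getD_eq_getElem?_getD]
      have hdrop : rs.drop (k + 1) = (rs.drop k).drop 1 := by
        rw [List.drop_drop]
      rw [hget, hdrop]
      simp [fillGo, List.countP_cons]
      omega
    · rw [List.foldl_cons]
      rw [show (if (x : String) ≠ "." then (acc ++ [x], (k : Int))
          else (acc ++ [PySem.List.pyGetD rs (k : Int) ""], (k : Int) + 1))
        = (acc ++ [x], ((k : Nat) : Int)) from by simp [hxv]]
      rw [ihx (acc ++ [x]) k]
      simp [fillGo, hxv, List.countP_cons]

theorem alt_eq_ideal (mm : List String) : remove_sapce_alt mm = idealS mm := by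
  unfold remove_sapce_alt
  dsimp only
  have hn : mm.foldl (fun acc x => if x ≠ "." then acc + 1 else acc) (0 : Int)
      = ((ndS mm : Nat) : Int) := by
    rw [PySem.List.foldl_ite_add_one]
    simp [ndS]
  rw [hn]
  rw [PySem.List.slice_from_natCast, PySem.List.slice_to_natCast]
  have hf := fill_fold ((List.filter (fun x => decide (x ≠ ".")) (List.drop (ndS mm) mm)).reverse)
      (List.take (ndS mm) mm) [] 0
  push_cast at hf
  rw [hf]
  dsimp only
  have hrep : PySem.List.pyRepeat ["."] ((mm.length : Int) - ((ndS mm : Nat) : Int))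
      = List.replicate (mm.length - ndS mm) "." := by
    rw [show ((mm.length : Int) - ((ndS mm : Nat) : Int)) = (((mm.length - ndS mm : Nat)) : Int) from by
      have := ndS_le mm; push_cast; omega]
    rw [PySem.List.pyRepeat_singleton]
    simp
  rw [hrep]
  simp only [List.nil_append, List.drop_zero]
  rfl

theorem A_eq_CS (mm : List String) : remove_sapce mm = CS mm := by
  unfold remove_sapce
  have h := loopA_window mm.length mm [] [] 0 ((mm.length : Int) - 1) le_rfl (by simp) (by simp)
  simpa using h

theorem fillGo_ne_dot (xs : List String) : ∀ rs, (∀ r ∈ rs, r ≠ ".") →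
    ∀ e ∈ fillGo xs rs, e ≠ "." := by
  induction xs with
  | nil => intro rs _ e he; simp [fillGo] at he
  | cons x xs ih =>
    intro rs h e he
    by_cases hx : x = "."
    · rw [show fillGo (x :: xs) rs = rs.getD 0 "" :: fillGo xs (rs.drop 1) from by
        simp [fillGo, hx]] at he
      rcases List.mem_cons.mp he with he | he
      · subst he
        cases rs with
        | nil => simp [List.getD]
        | cons r rs' => simpa using h r (by simp)
      · exact ih _ (fun r hr => h r (List.mem_of_mem_drop hr)) e he
    · rw [show fillGo (x :: xs) rs = x :: fillGo xs rs from by simp [fillGo, hx]] at he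
      rcases List.mem_cons.mp he with he | he
      · subst he; exact hx
      · exact ih _ h e he

theorem swap_ne_ideal (t : List String) (hFS : Race t = true) :
    swapNN (idealS t) (ndS t) ≠ idealS t := by
  obtain ⟨hk1, hk2⟩ := Race_pos t.length t le_rfl hFS
  set k := ndS t with hkdef
  set l := idealS t with hldef
  have hfl : (fillGo (t.take k) (((t.drop k).filter (fun x => decide (x ≠ "."))).reverse)).length
      = k := by
    rw [length_fillGo, List.length_take]
    omega
  -- value at position k - 1 of l is a fill element, hence not "."
  have h1 : l.getD (k - 1) "" ≠ "." := by
    rw [hldef]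
    unfold idealS
    rw [List.getD_append _ _ _ _ (by rw [hfl]; omega)]
    rw [List.getD_eq_getElem _ _ (by rw [hfl]; omega)]
    apply fillGo_ne_dot _ _ _ _ (List.getElem_mem _)
    intro r hr
    have := List.of_mem_filter (List.mem_reverse.mp hr)
    simpa using this
  -- value at position k of l is in the dot padding
  have h2 : l.getD k "" = "." := by
    rw [hldef]
    unfold idealS
    rw [List.getD_eq_getElem?_getD, List.getElem?_append_right (le_of_eq hfl)]
    rw [hfl, Nat.sub_self]
    have h0 : 0 < t.length - k := by omega
    rw [List.getElem?_replicate, if_pos h0]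
    rfl
  intro hcontra
  have hlen : (k - 1) < l.length := by rw [hldef, length_idealS]; omega
  have hsw : (swapNN l k).getD (k - 1) "" = "." := by
    unfold swapNN
    rw [List.getD_eq_getElem?_getD, List.getElem?_set_ne (by omega), List.getElem?_set_self',
      List.getElem?_eq_getElem hlen]
    simp [← h2, List.getD_eq_getElem?_getD]
  rw [hcontra] at hsw
  exact h1 hsw


-- ---- run-length toolkit for the closed-form change region ----

def dcS (t : List String) : Nat := t.countP (fun x => decide (x = "."))
def vrun (l : List String) : Nat := (l.reverse.takeWhile (fun x => decide (x ≠ "."))).length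
def drun (l : List String) : Nat := (l.takeWhile (fun x => decide (x = "."))).length

-- Struct t: t splits at the compaction boundary into p ++ value :: "." :: q with the counting
-- invariant (dots of p = values of q) and equal boundary runs; equals D_remove_sapce (below).
def Struct (t : List String) : Prop :=
  ∃ p v q, t = p ++ v :: "." :: q ∧ v ≠ "." ∧ dcS p = ndS q ∧ vrun p = drun q

theorem tw_app_all {p : String → Bool} (l l' : List String) (h : ∀ a ∈ l, p a = true) :
    (l ++ l').takeWhile p = l ++ l'.takeWhile p := by
  induction l with
  | nil => simp
  | cons a l ih =>
    simp [List.takeWhile_cons, h a (by simp), ih (fun b hb => h b (by simp [hb]))]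

theorem tw_app_stop {p : String → Bool} (l l' : List String) (h : ∃ a ∈ l, p a = false) :
    (l ++ l').takeWhile p = l.takeWhile p := by
  induction l with
  | nil => simp at h
  | cons a l ih =>
    by_cases ha : p a = true
    · have h' : ∃ b ∈ l, p b = false := by
        rcases h with ⟨b, hb, hpb⟩
        rcases List.mem_cons.mp hb with rfl | hb'
        · rw [ha] at hpb; cases hpb
        · exact ⟨b, hb', hpb⟩
      simp [List.takeWhile_cons, ha, ih h']
    · have ha' : p a = false := by simpa using ha
      simp [List.takeWhile_cons, ha']

theorem tw_all_self {p : String → Bool} (l : List String) (h : ∀ a ∈ l, p a = true) :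
    l.takeWhile p = l := by
  have := tw_app_all l [] h
  simpa using this

theorem vrun_all (l : List String) (h : ∀ a ∈ l, a ≠ ".") : vrun l = l.length := by
  unfold vrun
  rw [tw_all_self _ (fun a ha => by simpa using h a (List.mem_reverse.mp ha))]
  simp

theorem drun_all (l : List String) (h : ∀ a ∈ l, a = ".") : drun l = l.length := by
  unfold drun
  rw [tw_all_self _ (fun a ha => by simpa using h a ha)]

theorem vrun_cons_dot (l : List String) : vrun ("." :: l) = vrun l := by
  unfold vrun
  rw [List.reverse_cons]
  by_cases h : ∀ a ∈ l.reverse, (fun x => decide (x ≠ ".")) a = true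
  · rw [tw_app_all _ _ h, tw_all_self _ h]
    simp
  · push_neg at h
    rcases h with ⟨a, ha, hpa⟩
    rw [tw_app_stop _ _ ⟨a, ha, by simpa using hpa⟩]

theorem vrun_cons_val (v : String) (l : List String) (hd : "." ∈ l) :
    vrun (v :: l) = vrun l := by
  unfold vrun
  rw [List.reverse_cons, tw_app_stop _ _ ⟨".", List.mem_reverse.mpr hd, by simp⟩]

theorem vrun_cons_val_all (v : String) (l : List String) (hv : v ≠ ".") (h : ∀ a ∈ l, a ≠ ".") :
    vrun (v :: l) = l.length + 1 := by
  unfold vrun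
  rw [List.reverse_cons, tw_app_all _ _ (fun a ha => by simpa using h a (List.mem_reverse.mp ha))]
  simp [hv]

theorem drun_app_val (l : List String) (y : String) (hy : y ≠ ".") :
    drun (l ++ [y]) = drun l := by
  unfold drun
  by_cases h : ∀ a ∈ l, (fun x => decide (x = ".")) a = true
  · rw [tw_app_all _ _ h, tw_all_self _ h]
    simp [hy]
  · push_neg at h
    rcases h with ⟨a, ha, hpa⟩
    rw [tw_app_stop _ _ ⟨a, ha, by simpa using hpa⟩]

theorem drun_app_dot (l : List String) (h : ∃ a ∈ l, a ≠ ".") :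
    drun (l ++ ["."]) = drun l := by
  unfold drun
  rcases h with ⟨a, ha, hpa⟩
  rw [tw_app_stop _ _ ⟨a, ha, by simpa using hpa⟩]

theorem drun_app_dot_all (l : List String) (h : ∀ a ∈ l, a = ".") :
    drun (l ++ ["."]) = l.length + 1 := by
  unfold drun
  rw [tw_app_all _ _ (fun a ha => by simpa using h a ha)]
  simp

theorem ndS_add_dcS (l : List String) : ndS l + dcS l = l.length := by
  induction l with
  | nil => rfl
  | cons a l ih =>
    by_cases ha : a = "." <;> simp [ndS, dcS, List.countP_cons, ha] at ih ⊢ <;> omega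

theorem exists_dot (l : List String) (h : dcS l ≠ 0) : "." ∈ l := by
  have hp : 0 < l.countP (fun x => decide (x = ".")) := Nat.pos_of_ne_zero h
  rcases List.countP_pos_iff.mp hp with ⟨a, ha, hpa⟩
  simp at hpa
  rwa [hpa] at ha

theorem exists_val (l : List String) (h : ndS l ≠ 0) : ∃ a ∈ l, a ≠ "." := by
  have hp : 0 < l.countP (fun x => decide (x ≠ ".")) := Nat.pos_of_ne_zero h
  rcases List.countP_pos_iff.mp hp with ⟨a, ha, hpa⟩
  exact ⟨a, ha, by simpa using hpa⟩

theorem all_dots (l : List String) (h : ndS l = 0) : ∀ a ∈ l, a = "." := by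
  intro a ha
  have := List.countP_eq_zero.mp h a ha
  simpa using this

theorem all_vals (l : List String) (h : dcS l = 0) : ∀ a ∈ l, a ≠ "." := by
  intro a ha
  have := List.countP_eq_zero.mp h a ha
  simpa using this

theorem ndS_concat_val (l : List String) (y : String) (hy : y ≠ ".") :
    ndS (l ++ [y]) = ndS l + 1 := by
  simp [ndS, List.countP_append, hy]

theorem ndS_concat_dot (l : List String) : ndS (l ++ ["."]) = ndS l := by
  simp [ndS, List.countP_append]

theorem ndS_cons (u : String) (l : List String) :
    ndS (u :: l) = (if u = "." then 0 else 1) + ndS l := by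
  by_cases hu : u = "." <;> simp [ndS, List.countP_cons, hu] <;> omega

theorem dcS_cons_dot (l : List String) : dcS ("." :: l) = dcS l + 1 := by
  simp [dcS, List.countP_cons]

theorem dcS_cons_val (v : String) (l : List String) (hv : v ≠ ".") : dcS (v :: l) = dcS l := by
  simp [dcS, List.countP_cons, hv]

-- the four end-strip equivalences for Struct

theorem concat_inj {α : Type} (l₁ l₂ : List α) (a b : α) (h : l₁ ++ [a] = l₂ ++ [b]) :
    l₁ = l₂ ∧ a = b := by
  have := List.append_inj' h (by simp)
  exact ⟨this.1, by simpa using this.2⟩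

theorem last_of_concat_eq (m q : List String) (y v : String) (hy : y ≠ ".")
    (h : m ++ [y] = q ++ [v, "."]) : False := by
  have h2 : m ++ [y] = (q ++ [v]) ++ ["."] := by simpa using h
  exact hy (concat_inj _ _ _ _ h2).2

theorem LS (m : List String) (y : String) (hy : y ≠ ".") :
    Struct ("." :: (m ++ [y])) ↔ Struct m := by
  constructor
  · rintro ⟨p, v, q, heq, hv, hc, hr⟩
    cases p with
    | nil => exact absurd (by injection heq with h _; exact h.symm) hv
    | cons a p' =>
      rw [List.cons_append] at heq
      injection heq with ha heq2
      subst ha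
      rcases List.eq_nil_or_concat q with rfl | ⟨q', yq, rfl⟩
      · exact absurd heq2 (fun h => last_of_concat_eq m p' y v hy (by simpa using h))
      rw [List.concat_eq_append] at *
      have h3 : m ++ [y] = (p' ++ v :: "." :: q') ++ [yq] := by simpa using heq2
      obtain ⟨rfl, rfl⟩ := concat_inj _ _ _ _ h3
      refine ⟨p', v, q', rfl, hv, ?_, ?_⟩
      · rw [dcS_cons_dot] at hc
        rw [ndS_concat_val _ _ hy] at hc
        omega
      · rw [vrun_cons_dot] at hr
        rw [drun_app_val _ _ hy] at hr
        exact hr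
  · rintro ⟨p, v, q, rfl, hv, hc, hr⟩
    refine ⟨"." :: p, v, q ++ [y], by simp, hv, ?_, ?_⟩
    · rw [dcS_cons_dot, ndS_concat_val _ _ hy]
      omega
    · rw [vrun_cons_dot, drun_app_val _ _ hy]
      exact hr

theorem LF (v0 : String) (m : List String) (y : String) (hv0 : v0 ≠ ".") (hy : y ≠ ".") :
    Struct (v0 :: (m ++ [y])) ↔ Struct (m ++ [y]) := by
  constructor
  · rintro ⟨p, v, q, heq, hv, hc, hr⟩
    cases p with
    | nil =>
      injection heq with hv0v heq2
      -- m ++ [y] = "." :: q with ndS q = dcS [] = 0: impossible since y is a value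
      exfalso
      have h1 : ndS (m ++ [y]) = ndS ("." :: q) := by rw [heq2]
      rw [ndS_concat_val _ _ hy] at h1
      have h2 : ndS ("." :: q) = ndS q := by simp [ndS, List.countP_cons]
      rw [h2, ← hc] at h1
      simp [dcS] at h1
    | cons a p' =>
      rw [List.cons_append] at heq
      injection heq with ha heq2
      subst ha
      -- q must end with y, hence ndS q ≥ 1, hence "." ∈ p'
      rcases List.eq_nil_or_concat q with rfl | ⟨q', yq, rfl⟩
      · exact absurd heq2 (fun h => last_of_concat_eq m p' y v hy (by simpa using h))
      rw [List.concat_eq_append] at *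
      have h3 : m ++ [y] = (p' ++ v :: "." :: q') ++ [yq] := by simpa using heq2
      obtain ⟨hm, rfl⟩ := concat_inj _ _ _ _ h3
      have hq1 : ndS (q' ++ [y]) ≠ 0 := by rw [ndS_concat_val _ _ hy]; omega
      have hp1 : dcS p' ≠ 0 := by
        rw [dcS_cons_val _ _ hv0] at hc
        omega
      refine ⟨p', v, q' ++ [y], by rw [hm]; simp, hv, ?_, ?_⟩
      · rw [dcS_cons_val _ _ hv0] at hc
        exact hc
      · rw [vrun_cons_val _ _ (exists_dot _ hp1)] at hr
        exact hr
  · rintro ⟨p, v, q, heq, hv, hc, hr⟩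
    have hq1 : ndS q ≠ 0 := by
      rcases List.eq_nil_or_concat q with rfl | ⟨q', yq, rfl⟩
      · exact absurd heq (fun h => last_of_concat_eq m p y v hy (by simpa using h))
      rcases concat_inj _ _ _ _ (by simpa using heq : m ++ [y] = (p ++ v :: "." :: q') ++ [yq])
        with ⟨_, rfl⟩
      rw [List.concat_eq_append, ndS_concat_val _ _ hy]
      omega
    have hp1 : dcS p ≠ 0 := by omega
    refine ⟨v0 :: p, v, q, by rw [heq]; rfl, hv, ?_, ?_⟩
    · rw [dcS_cons_val _ _ hv0]
      exact hc
    · rw [vrun_cons_val _ _ (exists_dot _ hp1)]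
      exact hr

theorem LB (m : List String) : Struct (("." :: m) ++ ["."]) ↔ Struct ("." :: m) := by
  constructor
  · rintro ⟨p, v, q, heq, hv, hc, hr⟩
    cases p with
    | nil => exact absurd (by injection heq with h _; exact h.symm) hv
    | cons a p' =>
      rw [List.cons_append, List.cons_append] at heq
      injection heq with ha heq2
      subst ha
      have hq1 : ndS q ≠ 0 := by rw [← hc, dcS_cons_dot]; omega
      rcases List.eq_nil_or_concat q with rfl | ⟨q', lq, rfl⟩
      · simp [ndS] at hq1
      rw [List.concat_eq_append] at *
      have h3 : m ++ ["."] = (p' ++ v :: "." :: q') ++ [lq] := by simpa using heq2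
      obtain ⟨hm, rfl⟩ := concat_inj _ _ _ _ h3
      have hq1' : ndS q' ≠ 0 := by
        rwa [ndS_concat_dot] at hq1
      refine ⟨"." :: p', v, q', by rw [hm]; rfl, hv, ?_, ?_⟩
      · rw [ndS_concat_dot] at hc
        exact hc
      · rw [drun_app_dot _ (exists_val _ hq1')] at hr
        exact hr
  · rintro ⟨p, v, q, heq, hv, hc, hr⟩
    have hp1 : dcS p ≠ 0 := by
      cases p with
      | nil => exact absurd (by injection heq with h _; exact h.symm) hv
      | cons a p' =>
        injection heq with ha _
        subst ha
        rw [dcS_cons_dot]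
        omega
    have hq1 : ndS q ≠ 0 := by omega
    refine ⟨p, v, q ++ ["."], by rw [heq]; simp, hv, ?_, ?_⟩
    · rw [ndS_concat_dot]
      exact hc
    · rw [drun_app_dot _ (exists_val _ hq1)]
      exact hr

theorem LFB (x : String) (m : List String) (hx : x ≠ ".") (hm : m ≠ []) :
    Struct (x :: (m ++ ["."])) ↔ Struct m := by
  constructor
  · rintro ⟨p, v, q, heq, hv, hc, hr⟩
    cases p with
    | nil =>
      injection heq with hxv heq2
      exfalso
      -- q is all dots (ndS q = 0) with drun q = 0, so q = [] and m = [] — contradiction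
      have hq0 : ndS q = 0 := by rw [← hc]; rfl
      have hd0 : drun q = 0 := by rw [← hr]; rfl
      have hqlen : drun q = q.length := drun_all q (all_dots q hq0)
      have hq : q = [] := List.length_eq_zero_iff.mp (by omega)
      subst hq
      have : m = [] := by
        have h2 : m ++ ["."] = [] ++ ["."] := by simpa using heq2
        exact (concat_inj _ _ _ _ h2).1
      exact hm this
    | cons a p' =>
      rw [List.cons_append] at heq
      injection heq with ha heq2
      subst ha
      rcases List.eq_nil_or_concat q with rfl | ⟨q', lq, rfl⟩
      · -- q = []: vrun (x :: p') = 0 but p' is all values — impossible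
        exfalso
        have hp0 : dcS p' = 0 := by
          rw [dcS_cons_val _ _ hx] at hc
          simpa [ndS] using hc
        have hvr : vrun (x :: p') = p'.length + 1 :=
          vrun_cons_val_all _ _ hx (all_vals _ hp0)
        rw [hvr] at hr
        simp [drun] at hr
      rw [List.concat_eq_append] at *
      have h3 : m ++ ["."] = (p' ++ v :: "." :: q') ++ [lq] := by simpa using heq2
      obtain ⟨hm2, rfl⟩ := concat_inj _ _ _ _ h3
      rw [dcS_cons_val _ _ hx, ndS_concat_dot] at hc
      refine ⟨p', v, q', hm2, hv, hc, ?_⟩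
      by_cases hp0 : dcS p' = 0
      · have hq0 : ndS q' = 0 := by omega
        rw [vrun_cons_val_all _ _ hx (all_vals _ hp0),
          drun_app_dot_all _ (all_dots _ hq0)] at hr
        rw [vrun_all _ (all_vals _ hp0), drun_all _ (all_dots _ hq0)]
        omega
      · have hq0 : ndS q' ≠ 0 := by omega
        rw [vrun_cons_val _ _ (exists_dot _ hp0), drun_app_dot _ (exists_val _ hq0)] at hr
        exact hr
  · rintro ⟨p, v, q, rfl, hv, hc, hr⟩
    refine ⟨x :: p, v, q ++ ["."], by simp, hv, ?_, ?_⟩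
    · rw [dcS_cons_val _ _ hx, ndS_concat_dot]
      exact hc
    · by_cases hp0 : dcS p = 0
      · have hq0 : ndS q = 0 := by omega
        rw [vrun_cons_val_all _ _ hx (all_vals _ hp0), drun_app_dot_all _ (all_dots _ hq0)]
        rw [vrun_all _ (all_vals _ hp0), drun_all _ (all_dots _ hq0)] at hr
        omega
      · have hq0 : ndS q ≠ 0 := by omega
        rw [vrun_cons_val _ _ (exists_dot _ hp0), drun_app_dot _ (exists_val _ hq0)]
        exact hr

theorem Struct_nil : ¬ Struct [] := by
  rintro ⟨p, v, q, heq, -⟩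
  simp at heq

theorem Struct_single (x : String) : ¬ Struct [x] := by
  rintro ⟨p, v, q, heq, -⟩
  have := congrArg List.length heq
  simp at this
  omega

theorem Struct_pair (x : String) (hx : x ≠ ".") : Struct [x, "."] :=
  ⟨[], x, [], rfl, hx, rfl, rfl⟩

-- Race coincides with the closed-form region
theorem Race_iff_Struct (fuel : Nat) : ∀ t : List String, t.length ≤ fuel →
    (Race t = true ↔ Struct t) := by
  induction fuel with
  | zero =>
    intro t hlen
    have ht : t = [] := List.length_eq_zero_iff.mp (by omega)
    subst ht
    simp [Race, Struct_nil]
  | succ n ih =>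
    intro t hlen
    rcases t with _ | ⟨x, rest⟩
    · simp [Race, Struct_nil]
    rcases List.eq_nil_or_concat rest with hrest | ⟨m, y, hmy⟩
    · subst hrest
      simp [Race, Struct_single]
    rw [List.concat_eq_append] at hmy
    subst hmy
    simp only [List.length_cons, List.length_append, List.length_singleton] at hlen
    rw [Race_cat]
    by_cases hx : x = "." <;> by_cases hy : y = "."
    · -- x = ".", y = "."
      subst hx hy
      rw [if_neg (by simp), if_pos rfl]
      rcases List.eq_nil_or_concat m with rfl | ⟨mid, ml, rfl⟩
      · rw [if_neg (by simp)]
        rw [ih ["."] (by simp at hlen ⊢; omega) ]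
        rw [show ("." :: (([] : List String) ++ ["."]) : List String)
            = (("." :: []) ++ ["."] : List String) from rfl]
        rw [LB []]
      · rw [List.concat_eq_append] at *
        by_cases hml : ml = "."
        · rw [if_neg (by simp [List.getLastD_concat, hml])]
          rw [ih ("." :: (mid ++ [ml])) (by simp at hlen ⊢; omega)]
          rw [show ("." :: ((mid ++ [ml]) ++ ["."]) : List String)
              = (("." :: (mid ++ [ml])) ++ ["."] : List String) from rfl]
          rw [LB]
        · rw [if_pos (by simp [List.getLastD_concat, hml])]
          rw [List.dropLast_concat]
          rw [ih mid (by simp at hlen ⊢; omega)]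
          rw [show ("." :: ((mid ++ [ml]) ++ ["."]) : List String)
              = (("." :: (mid ++ [ml])) ++ ["."] : List String) from rfl]
          rw [LB, LS mid ml hml]
    · -- x = ".", y ≠ "."
      subst hx
      rw [if_neg (by simp), if_neg hy]
      rw [ih m (by omega)]
      rw [LS m y hy]
    · -- x ≠ ".", y = "."
      subst hy
      rw [if_pos hx, if_pos rfl]
      rcases List.eq_nil_or_concat m with rfl | ⟨mid, ml, rfl⟩
      · rw [if_pos rfl]
        simp [Struct_pair x hx]
      · rw [List.concat_eq_append] at *
        rw [if_neg (by simp)]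
        by_cases hsub : 2 ≤ (mid ++ [ml]).length ∧ (mid ++ [ml]).getD 0 "" = "."
            ∧ (mid ++ [ml]).getLastD "." ≠ "."
        · rw [if_pos hsub]
          obtain ⟨hlen2, hhead, hlast⟩ := hsub
          rw [List.getLastD_concat] at hlast
          -- mid = "." :: mid' and the recursive argument is mid'.dropLast ++ ... : decompose
          rcases mid with _ | ⟨m0, mid'⟩
          · simp at hlen2
          have hm0 : m0 = "." := by simpa using hhead
          subst hm0
          rw [show ((("." :: mid') ++ [ml]).drop 1 : List String) = mid' ++ [ml] from rfl]
          rw [List.dropLast_concat]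
          rw [ih mid' (by simp at hlen ⊢; omega)]
          rw [LFB x (("." :: mid') ++ [ml]) hx (by simp)]
          rw [show ((("." :: mid') ++ [ml]) : List String) = "." :: (mid' ++ [ml]) from rfl]
          rw [LS mid' ml hlast]
        · rw [if_neg hsub]
          rw [ih ((mid ++ [ml])) (by simp at hlen ⊢; omega)]
          rw [LFB x (mid ++ [ml]) hx (by simp)]
    · -- x ≠ ".", y ≠ "."
      rw [if_pos hx, if_neg hy]
      by_cases hsub : m ≠ [] ∧ m.getD 0 "" = "."
      · rw [if_pos hsub]
        obtain ⟨hne, hhead⟩ := hsub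
        rcases m with _ | ⟨m0, m'⟩
        · exact absurd rfl hne
        have hm0 : m0 = "." := by simpa using hhead
        subst hm0
        rw [show (("." :: m').drop 1 : List String) = m' from rfl]
        rw [ih m' (by simp at hlen ⊢; omega)]
        rw [show (x :: (("." :: m') ++ [y]) : List String)
            = x :: (("." :: m') ++ [y]) from rfl]
        rw [LF x ("." :: m') y hx hy]
        rw [show ((("." :: m') ++ [y]) : List String) = "." :: (m' ++ [y]) from rfl]
        rw [LS m' y hy]
      · rw [if_neg hsub]
        rw [ih (m ++ [y]) (by simp at hlen ⊢; omega)]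
        rw [LF x m y hx hy]

def Pfm (t : List String) : Prop :=
  t.getD (ndS t - 1) "." ≠ "." ∧ t.getD (ndS t) "" = "." ∧
  vrun (t.take (ndS t - 1)) = drun (t.drop (ndS t + 1))

theorem Pfm_iff_Struct (t : List String) : Pfm t ↔ Struct t := by
  unfold Pfm
  constructor
  · rintro ⟨hA', hB', hC'⟩
    -- ndS t ≥ 1 and ndS t < t.length
    have hn1 : 1 ≤ ndS t := by
      by_contra h
      have h0 : ndS t = 0 := by omega
      have hall := all_dots t h0
      rcases t with _ | ⟨a, l⟩
      · exact hA' rfl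
      · have ha : a = "." := hall a (by simp)
        refine hA' ?_
        have h00 : ndS (a :: l) - 1 = 0 := by omega
        rw [h00]
        simpa using ha
    have hn2 : ndS t < t.length := by
      by_contra h
      rw [List.getD_eq_default _ _ (by omega)] at hB'
      exact absurd hB' (by decide)
    have hd1 := List.drop_eq_getElem_cons (show ndS t - 1 < t.length by omega)
    rw [show ndS t - 1 + 1 = ndS t from by omega] at hd1
    have hd2 := List.drop_eq_getElem_cons (show ndS t < t.length by omega)
    have hsplit : t = t.take (ndS t - 1) ++ t[ndS t - 1] :: t[ndS t] :: t.drop (ndS t + 1) := by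
      conv_lhs => rw [← List.take_append_drop (ndS t - 1) t]
      rw [hd1, hd2]
    have hAe : t[ndS t - 1] = t.getD (ndS t - 1) "." := (List.getD_eq_getElem _ _ (by omega)).symm
    have hBe : t[ndS t] = t.getD (ndS t) "" := (List.getD_eq_getElem _ _ (by omega)).symm
    refine ⟨t.take (ndS t - 1), t[ndS t - 1], t.drop (ndS t + 1), ?_, by rw [hAe]; exact hA', ?_, ?_⟩
    · rw [← hB', ← hBe]
      exact hsplit
    · -- dcS (take) = ndS (drop): counting through the split
      have hlen1 : (t.take (ndS t - 1)).length = ndS t - 1 := by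
        rw [List.length_take]
        omega
      have hcnt : ndS (t.take (ndS t - 1)) + 1 + ndS (t.drop (ndS t + 1)) = ndS t := by
        have h1 : ndS (t.take (ndS t - 1) ++ t[ndS t - 1] :: t[ndS t] :: t.drop (ndS t + 1))
            = ndS t := by rw [← hsplit]
        rw [show ndS (t.take (ndS t - 1) ++ t[ndS t - 1] :: t[ndS t] :: t.drop (ndS t + 1))
            = ndS (t.take (ndS t - 1)) + ndS (t[ndS t - 1] :: t[ndS t] :: t.drop (ndS t + 1)) from by
              simp [ndS, List.countP_append]] at h1
        have hv1 : t[ndS t - 1] ≠ "." := by rw [hAe]; exact hA'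
        have hv2 : t[ndS t] = "." := by rw [hBe]; exact hB'
        rw [show ndS (t[ndS t - 1] :: t[ndS t] :: t.drop (ndS t + 1))
            = 1 + ndS (t.drop (ndS t + 1)) from by
              rw [ndS_cons, ndS_cons, if_neg hv1, if_pos hv2]
              omega] at h1
        omega
      have := ndS_add_dcS (t.take (ndS t - 1))
      omega
    · exact hC'
  · rintro ⟨p, v, q, rfl, hv, hc, hr⟩
    have hnp : ndS (p ++ v :: "." :: q) = p.length + 1 := by
      have h1 : ndS (p ++ v :: "." :: q) = ndS p + 1 + ndS q := by
        simp [ndS, List.countP_append, List.countP_cons, hv]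
        omega
      have h2 := ndS_add_dcS p
      omega
    rw [show ndS (p ++ v :: "." :: q) = p.length + 1 from hnp]
    have ht1 : p.length + 1 - 1 = p.length := by omega
    refine ⟨?_, ?_, ?_⟩
    · rw [ht1, List.getD_eq_getElem?_getD, List.getElem?_append_right le_rfl]
      simpa using hv
    · rw [List.getD_eq_getElem?_getD, List.getElem?_append_right (by omega)]
      rw [show p.length + 1 - p.length = 1 from by omega]
      simp
    · rw [ht1, List.take_left, show p.length + 1 + 1 = (p ++ [v, "."]).length from by simp,
        show (p ++ v :: "." :: q : List String) = (p ++ [v, "."]) ++ q from by simp,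
        List.drop_left]
      exact hr

theorem vrun_concat_val (l : List String) (v : String) (hv : v ≠ ".") :
    vrun (l ++ [v]) = vrun l + 1 := by
  unfold vrun
  rw [List.reverse_append]
  simp [List.takeWhile_cons, hv]

theorem vrun_concat_dot (l : List String) : vrun (l ++ ["."]) = 0 := by
  unfold vrun
  rw [List.reverse_append]
  simp [List.takeWhile_cons]

theorem drun_cons_dot (l : List String) : drun ("." :: l) = drun l + 1 := by
  simp [drun, List.takeWhile_cons]

theorem drun_cons_val (v : String) (l : List String) (hv : v ≠ ".") : drun (v :: l) = 0 := by
  simp [drun, List.takeWhile_cons, hv]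

theorem rtake_len (l : List String) :
    (l.rtakeWhile (fun x => decide (x ≠ "."))).length = vrun l := by
  unfold vrun
  rw [List.rtakeWhile]
  simp

theorem D_unfold (t : List String) : D_remove_sapce t ↔
    (0 < vrun (t.take (ndS t)) ∧ vrun (t.take (ndS t)) = drun (t.drop (ndS t))) := by
  unfold D_remove_sapce
  constructor
  · intro h
    obtain ⟨h1, h2⟩ := h
    rw [rtake_len] at h1 h2
    exact ⟨h1, h2⟩
  · intro h
    obtain ⟨h1, h2⟩ := h
    exact ⟨by rw [rtake_len]; exact h1, by rw [rtake_len]; exact h2⟩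

theorem D_iff_Pfm (t : List String) : D_remove_sapce t ↔ Pfm t := by
  rw [D_unfold]
  unfold Pfm
  have hnle := ndS_le t
  constructor
  · rintro ⟨h0, heq⟩
    have hn1 : 1 ≤ ndS t := by
      by_contra h
      have h00 : ndS t = 0 := by omega
      rw [h00] at h0
      simp [vrun, drun] at h0
    have hn2 : ndS t < t.length := by
      by_contra h
      have hnil : t.drop (ndS t) = [] := List.drop_eq_nil_of_le (by omega)
      rw [hnil] at heq
      simp [drun] at heq
      omega
    have htake : t.take (ndS t) = t.take (ndS t - 1) ++ [t[ndS t - 1]] := by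
      have h1 : t.take ((ndS t - 1) + 1) = t.take (ndS t - 1) ++ t[ndS t - 1]?.toList :=
        List.take_succ
      rw [List.getElem?_eq_getElem (show ndS t - 1 < t.length by omega)] at h1
      rw [show (ndS t - 1) + 1 = ndS t from by omega] at h1
      simpa using h1
    have hdrop : t.drop (ndS t) = t[ndS t] :: t.drop (ndS t + 1) :=
      List.drop_eq_getElem_cons hn2
    have hv1 : t[ndS t - 1] ≠ "." := by
      intro hcon
      rw [htake, hcon, vrun_concat_dot] at h0
      omega
    have hv2 : t[ndS t] = "." := by
      by_contra hcon
      rw [hdrop, drun_cons_val _ _ hcon, htake, vrun_concat_val _ _ hv1] at heq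
      omega
    refine ⟨?_, ?_, ?_⟩
    · rw [List.getD_eq_getElem _ _ (by omega)]
      exact hv1
    · rw [List.getD_eq_getElem _ _ (by omega)]
      exact hv2
    · rw [htake, vrun_concat_val _ _ hv1, hdrop, hv2, drun_cons_dot] at heq
      omega
  · rintro ⟨hA, hB, hC⟩
    have hn1 : 1 ≤ ndS t := by
      by_contra h
      have h0 : ndS t = 0 := by omega
      have hall := all_dots t h0
      rcases t with _ | ⟨a, l⟩
      · exact hA rfl
      · have ha : a = "." := hall a (by simp)
        refine hA ?_
        rw [show ndS (a :: l) - 1 = 0 from by omega]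
        simpa using ha
    have hn2 : ndS t < t.length := by
      by_contra h
      rw [List.getD_eq_default _ _ (by omega)] at hB
      exact absurd hB (by decide)
    have htake : t.take (ndS t) = t.take (ndS t - 1) ++ [t[ndS t - 1]] := by
      have h1 : t.take ((ndS t - 1) + 1) = t.take (ndS t - 1) ++ t[ndS t - 1]?.toList :=
        List.take_succ
      rw [List.getElem?_eq_getElem (show ndS t - 1 < t.length by omega)] at h1
      rw [show (ndS t - 1) + 1 = ndS t from by omega] at h1
      simpa using h1
    have hdrop : t.drop (ndS t) = t[ndS t] :: t.drop (ndS t + 1) :=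
      List.drop_eq_getElem_cons hn2
    have hv1 : t[ndS t - 1] ≠ "." := by
      rw [← List.getD_eq_getElem _ _ (show ndS t - 1 < t.length from by omega)]
      exact hA
    have hv2 : t[ndS t] = "." := by
      rw [← List.getD_eq_getElem _ _ hn2]
      exact hB
    rw [htake, vrun_concat_val _ _ hv1, hdrop, hv2, drun_cons_dot]
    omega

theorem D_iff_Race (t : List String) : D_remove_sapce t ↔ Race t = true := by
  rw [D_iff_Pfm, Pfm_iff_Struct, ← Race_iff_Struct t.length t le_rfl]

-- ===== VERDICT (by name: the statements are the Claim_ definitions above) =====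
theorem remove_sapce_spec : Claim_unchanged_remove_sapce := by
  intro memory_map _
  unfold Spec_remove_sapce
  intro hD
  rw [A_eq_CS, alt_eq_ideal, CS_eq_Bcore memory_map.length memory_map le_rfl]
  unfold Bcore
  rw [if_neg (fun h => hD ((D_iff_Race memory_map).mpr h))]

theorem remove_sapce_changed : Claim_changed_remove_sapce := by
  unfold Claim_changed_remove_sapce
  refine ⟨by decide, by decide, ?_, ?_, by decide⟩
  · rw [show pvDiffWitness_remove_sapce = ["a", "."] from rfl, A_eq_CS]
    rw [show (["a", "."] : List String) = "a" :: (([] : List String) ++ ["."]) from rfl, CS_cat]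
    simp
    decide
  · rw [show pvDiffWitness_remove_sapce = ["a", "."] from rfl, alt_eq_ideal]
    decide

theorem remove_sapce_tight : Claim_exact_remove_sapce := by
  intro memory_map _ hD
  have hFS : Race memory_map = true := (D_iff_Race memory_map).mp hD
  rw [A_eq_CS, alt_eq_ideal, CS_eq_Bcore memory_map.length memory_map le_rfl]
  unfold Bcore
  rw [if_pos hFS]
  exact swap_ne_ideal memory_map hFS
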